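-- pv_equiv track=rewrite | github.com/DevShaks/Stormworkspy | Stormworkspy/Stormworkspy.py | _register_name
-- ===== SOURCE A (Python) =====
-- def _register_name(mapping, name, index, length):
--     if name in mapping:
--         raise ValueError(f"{name} already registered")
--
--     used = set(mapping.values())
--     if index is None:
--         for i in range(length):
--             if i not in used:
--                 index = i
--                 break
--         else:
--             raise ValueError("No free slots available")
--     else:
--         if not 0 <= index < length:
--             raise IndexError("index out of range")
--         if index in used:
--             raise ValueError(f"Index {index} already used")
--
--     mapping[name] = index
--     return index
-- ===== SOURCE B (Python) =====
-- def _register_name(mapping, name, index, length):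
--     if name in mapping:
--         raise ValueError(f"{name} already registered")
--
--     used = set(mapping.values())
--     if index is None:
--         free = set(range(min(length, len(mapping) + 1))) - used
--         if not free:
--             raise ValueError("No free slots available")
--         index = min(free)
--     else:
--         if not 0 <= index < length:
--             raise IndexError("index out of range")
--         if index in used:
--             raise ValueError(f"Index {index} already used")
--
--     mapping[name] = index
--     return index
-- ===== Notes on version B (the rewrite author's own statement) =====
-- stated objective: alternative
-- what changed: The incremental first-free for/else scan is replaced by building the free-slot set (set(range(min(length, len(mapping)+1))) minus the used values, a sufficient range since the first free slot is at most len(mapping)) and taking its minimum, raising on an empty free set.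
import Mathlib
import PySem

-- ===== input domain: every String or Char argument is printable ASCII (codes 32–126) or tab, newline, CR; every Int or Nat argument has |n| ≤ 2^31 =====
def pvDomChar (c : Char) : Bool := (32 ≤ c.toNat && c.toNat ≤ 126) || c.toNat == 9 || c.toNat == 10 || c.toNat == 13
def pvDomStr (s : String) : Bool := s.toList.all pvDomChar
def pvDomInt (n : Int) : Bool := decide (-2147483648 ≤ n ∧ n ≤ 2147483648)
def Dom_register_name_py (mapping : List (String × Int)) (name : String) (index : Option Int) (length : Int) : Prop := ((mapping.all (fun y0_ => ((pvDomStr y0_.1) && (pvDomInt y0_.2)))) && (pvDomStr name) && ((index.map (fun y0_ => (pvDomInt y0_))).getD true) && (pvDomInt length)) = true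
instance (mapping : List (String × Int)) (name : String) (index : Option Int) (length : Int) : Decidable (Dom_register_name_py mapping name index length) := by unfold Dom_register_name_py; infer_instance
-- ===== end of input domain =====

-- B replaces A's incremental first-free for/else scan by min over the free-slot set
-- (set(range(min(length, len(mapping)+1))) minus the used values); equivalence is about
-- the RETURN value (both Pythons also insert name ↦ index into mapping identically).

-- ===== PORT A =====
-- `for i in range(length): if i not in used: index = i; break / else: raise` — the loop
-- with its break, as a recursion on i; none = the for/else ValueError.
def registerScanA (used : PySem.Set Int) (i length : Int) : Option Int :=
  if h : i < length then
    if !(PySem.Set.contains used i) then some i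
    else registerScanA used (i + 1) length
  else none
termination_by (length - i).toNat
decreasing_by omega

-- raise paths return 0 (excluded by Pre_).
def register_name_py (mapping : List (String × Int)) (name : String) (index : Option Int) (length : Int) : Int :=
  if mapping.any (fun p => p.1 == name) then 0  -- raise ValueError "... already registered"
  else
    let used : PySem.Set Int := PySem.Set.ofList (mapping.map Prod.snd)
    match index with
    | none =>
        match registerScanA used 0 length with
        | some i => i
        | none => 0  -- raise ValueError "No free slots available"
    | some i =>
        if !(0 ≤ i ∧ i < length : Bool) then 0  -- raise IndexError
        else if PySem.Set.contains used i then 0  -- raise ValueError "Index ... already used"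
        else i

-- ===== PORT B =====
def register_name_py_alt (mapping : List (String × Int)) (name : String) (index : Option Int) (length : Int) : Int :=
  if mapping.any (fun p => p.1 == name) then 0  -- raise ValueError "... already registered"
  else
    let used : PySem.Set Int := PySem.Set.ofList (mapping.map Prod.snd)
    match index with
    | none =>
        let free : PySem.Set Int :=
          PySem.Set.diff
            (PySem.Set.ofList (PySem.List.pyRange 0 (min length ((mapping.length : Int) + 1)) 1))
            used
        if free = [] then 0  -- raise ValueError "No free slots available"
        else (PySem.List.min? free (fun x => x)).getD 0
    | some i =>
        if !(0 ≤ i ∧ i < length : Bool) then 0  -- raise IndexError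
        else if PySem.Set.contains used i then 0  -- raise ValueError "Index ... already used"
        else i

-- ===== PRECONDITION & SPEC =====
-- Pre_ excludes exactly the inputs where A raises: name already a key; index None with no
-- free slot in range(length); a given index out of [0, length) or already used.
def Pre_register_name_py (mapping : List (String × Int)) (name : String) (index : Option Int) (length : Int) : Prop :=
  name ∉ mapping.map Prod.fst ∧
  -- 'some slot in range(length) is free' stated in closed form: the distinct used values
  -- lying inside [0, length) are fewer than length
  (index = none → ((((PySem.Set.ofList (mapping.map Prod.snd)).filter
      (fun v => decide (0 ≤ v ∧ v < length))).length : Int) < length)) ∧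
  (∀ i ∈ index.toList, 0 ≤ i ∧ i < length ∧ i ∉ mapping.map Prod.snd)

instance (mapping : List (String × Int)) (name : String) (index : Option Int) (length : Int) : Decidable (Pre_register_name_py mapping name index length) := by unfold Pre_register_name_py; infer_instance

def pvWitness_register_name_py : (List (String × Int)) × String × Option Int × Int := ([("a", 0)], "b", none, 2)

def Spec_register_name_py (mapping : List (String × Int)) (name : String) (index : Option Int) (length : Int) (out : Int) : Prop := out = register_name_py_alt mapping name index length
instance (mapping : List (String × Int)) (name : String) (index : Option Int) (length : Int) (out : Int) : Decidable (Spec_register_name_py mapping name index length out) := by unfold Spec_register_name_py; infer_instance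

-- ===== CLAIM (what is proved, stated in full; the proofs are below) =====
def Claim_equal_register_name_py : Prop := ∀ (mapping : List (String × Int)) (name : String) (index : Option Int) (length : Int), Dom_register_name_py mapping name index length → Pre_register_name_py mapping name index length → Spec_register_name_py mapping name index length (register_name_py mapping name index length)

-- ===== LEMMAS AND PROOFS =====

-- A's break-loop is the first match over range(i, length).
theorem scanA_eq_find? (used : PySem.Set Int) (a b : Int) :
    registerScanA used a b
      = (PySem.List.pyRange a b 1).find? (fun i => !(PySem.Set.contains used i)) := by
  by_cases h : a < b
  · rw [PySem.List.pyRange_one_cons h, registerScanA, dif_pos h]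
    by_cases hc : (!(PySem.Set.contains used a)) = true
    · rw [if_pos hc, List.find?_cons_of_pos (p := fun i => !(PySem.Set.contains used i)) hc]
    · rw [if_neg hc, List.find?_cons_of_neg (p := fun i => !(PySem.Set.contains used i)) hc]
      exact scanA_eq_find? used (a + 1) b
  · rw [PySem.List.pyRange_one_eq_nil (by omega), registerScanA, dif_neg h]
    rfl
termination_by (b - a).toNat
decreasing_by omega

-- The closed-form count 'distinct used values in [0, n) fewer than n' ↔ a free slot exists.
theorem free_slot_iff (vals : List Int) (n : Int) :
    ((((PySem.Set.ofList vals).filter (fun v => decide (0 ≤ v ∧ v < n))).length : Int) < n)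
    ↔ ∃ i ∈ PySem.List.pyRange 0 n 1, i ∉ vals := by
  constructor
  · intro h
    by_contra hno
    push Not at hno
    have hsub : PySem.List.pyRange 0 n 1 ⊆
        (PySem.Set.ofList vals).filter (fun v => decide (0 ≤ v ∧ v < n)) := by
      intro i hi
      rcases (PySem.List.mem_pyRange_one).mp hi with ⟨h0, h1⟩
      refine List.mem_filter.mpr ⟨(PySem.Set.mem_ofList _ _).mpr (hno i hi), by simp [h0, h1]⟩
    have hlen := ((PySem.List.nodup_pyRange_one (a := 0) (b := n)).subperm hsub).length_le
    rw [PySem.List.length_pyRange_one] at hlen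
    omega
  · rintro ⟨i, hi, hnot⟩
    rcases (PySem.List.mem_pyRange_one).mp hi with ⟨h0, h1⟩
    have hsub : (PySem.Set.ofList vals).filter (fun v => decide (0 ≤ v ∧ v < n)) ⊆
        (PySem.List.pyRange 0 n 1).filter (fun x => x ≠ i) := by
      intro v hv
      rcases List.mem_filter.mp hv with ⟨hvs, hvr⟩
      simp only [decide_eq_true_eq] at hvr
      refine List.mem_filter.mpr ⟨(PySem.List.mem_pyRange_one).mpr ⟨hvr.1, hvr.2⟩, ?_⟩
      have : v ∈ vals := (PySem.Set.mem_ofList _ _).mp hvs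
      simp only [ne_eq, decide_eq_true_eq]
      intro hvi; exact hnot (hvi ▸ this)
    have hnd : ((PySem.Set.ofList vals).filter
        (fun v => decide (0 ≤ v ∧ v < n))).Nodup := (PySem.Set.nodup_ofList vals).filter _
    have hle := (hnd.subperm hsub).length_le
    have hlt : ((PySem.List.pyRange 0 n 1).filter (fun x => x ≠ i)).length
        < (PySem.List.pyRange 0 n 1).length := by
      refine List.length_filter_lt_length_iff_exists.mpr ⟨i, hi, by simp⟩
    rw [PySem.List.length_pyRange_one] at hlt
    omega

-- On a strictly increasing list, the first element satisfying p is the minimum of the filtered list.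
theorem find?_eq_min?_filter (l : List Int) (p : Int → Bool)
    (hl : l.Pairwise (· < ·)) (hne : l.filter p ≠ []) :
    l.find? p = PySem.List.min? (l.filter p) (fun x => x) := by
  induction l with
  | nil => simp at hne
  | cons x t ih =>
    rcases List.pairwise_cons.mp hl with ⟨hx, ht⟩
    by_cases hpx : p x = true
    · rw [List.find?_cons_of_pos hpx]
      have hf : (x :: t).filter p = x :: t.filter p := List.filter_cons_of_pos hpx
      rw [hf, PySem.List.min?_id_cons]
      have hfold : (t.filter p).foldl min x = x := by
        rcases PySem.List.foldl_min_mem (t.filter p) x with h | h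
        · exact h
        · have hmem : (t.filter p).foldl min x ∈ t := (List.mem_filter.mp h).1
          have h1 := (PySem.List.foldl_min_le (t.filter p) x).1
          have h2 := hx _ hmem
          omega
      rw [hfold]
    · rw [List.find?_cons_of_neg hpx]
      have hf : (x :: t).filter p = t.filter p := List.filter_cons_of_neg (by simp [hpx])
      rw [hf] at hne ⊢
      exact ih ht hne

theorem register_name_py_eq (mapping : List (String × Int)) (name : String) (index : Option Int) (length : Int)
    (hpre : Pre_register_name_py mapping name index length) :
    register_name_py mapping name index length = register_name_py_alt mapping name index length := by
  obtain ⟨hname, hnone, hsome⟩ := hpre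
  unfold register_name_py register_name_py_alt
  cases index with
  | some i => rfl
  | none =>
    simp only
    set used : PySem.Set Int := PySem.Set.ofList (mapping.map Prod.snd) with hused
    set p : Int → Bool := fun i => !(PySem.Set.contains used i) with hp
    set m : Int := min length ((mapping.length : Int) + 1) with hm
    have hcount := hnone rfl
    have hpos : 0 < length := by
      have : (0 : Int) ≤ (((PySem.Set.ofList (mapping.map Prod.snd)).filter
          (fun v => decide (0 ≤ v ∧ v < length))).length : Int) := Int.natCast_nonneg _
      omega
    have hm0 : 0 ≤ m := by omega
    have hmle : m ≤ length := min_le_left _ _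
    -- p agrees with 'not a used value'
    have hpiff : ∀ i, p i = true ↔ i ∉ mapping.map Prod.snd := by
      intro i
      simp only [hp, hused, Bool.not_eq_eq_eq_not, Bool.not_true, Bool.eq_false_iff, ne_eq]
      constructor
      · intro hc hmem
        exact hc ((PySem.Set.contains_iff _ _).mpr ((PySem.Set.mem_ofList _ _).mpr hmem))
      · intro hmem hc
        exact hmem ((PySem.Set.mem_ofList _ _).mp ((PySem.Set.contains_iff _ _).mp hc))
    -- the free-slot list over [0, m) is nonempty
    have hne : (PySem.List.pyRange 0 m 1).filter p ≠ [] := by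
      have hfree : ∃ i ∈ PySem.List.pyRange 0 m 1, i ∉ mapping.map Prod.snd := by
        refine (free_slot_iff (mapping.map Prod.snd) m).mp ?_
        by_cases hc : length ≤ (mapping.length : Int) + 1
        · have : m = length := by omega
          rw [this]; exact hcount
        · have hmlen : m = (mapping.length : Int) + 1 := by omega
          have h1 : ((PySem.Set.ofList (mapping.map Prod.snd)).filter
              (fun v => decide (0 ≤ v ∧ v < m))).length
              ≤ (PySem.Set.ofList (mapping.map Prod.snd)).length := List.length_filter_le _ _
          have h2 := PySem.Set.length_ofList_le (mapping.map Prod.snd)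
          have h3 : (mapping.map Prod.snd).length = mapping.length := List.length_map _
          omega
      obtain ⟨j, hj, hjnot⟩ := hfree
      exact List.ne_nil_of_mem (List.mem_filter.mpr ⟨hj, (hpiff j).mpr hjnot⟩)
    -- A's scan over [0, length) stops inside [0, m)
    have hsplit : PySem.List.pyRange 0 length 1
        = PySem.List.pyRange 0 m 1 ++ PySem.List.pyRange m length 1 :=
      PySem.List.pyRange_one_append 0 m length hm0 hmle
    have hAfind : registerScanA used 0 length
        = PySem.List.min? ((PySem.List.pyRange 0 m 1).filter p) (fun x => x) := by
      rw [scanA_eq_find?, hsplit, List.find?_append,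
        find?_eq_min?_filter _ _ (PySem.List.pairwise_lt_pyRange_one 0 m) hne]
      rcases hmv : PySem.List.min? ((PySem.List.pyRange 0 m 1).filter p) (fun x => x) with _ | v
      · exact absurd ((PySem.List.min?_eq_none_iff _ _).mp hmv) hne
      · rfl
    -- B's free set is that filtered range
    have hofl : PySem.Set.ofList (PySem.List.pyRange 0 m 1) = PySem.List.pyRange 0 m 1 :=
      PySem.Set.ofList_eq_self_of_nodup _ (PySem.List.nodup_pyRange_one (a := 0) (b := m))
    have hfreedef : PySem.Set.diff (PySem.Set.ofList (PySem.List.pyRange 0 m 1)) used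
        = (PySem.List.pyRange 0 m 1).filter p := by
      rw [hofl]; rfl
    rw [hAfind, hfreedef, if_neg hne]
    rcases hmv : PySem.List.min? ((PySem.List.pyRange 0 m 1).filter p) (fun x => x) with _ | v
    · exact absurd ((PySem.List.min?_eq_none_iff _ _).mp hmv) hne
    · rfl

-- ===== VERDICT (by name: the statement is the Claim_ definition above) =====
theorem register_name_py_spec : Claim_equal_register_name_py := by
  intro mapping name index length _ hpre
  unfold Spec_register_name_py
  exact register_name_py_eq mapping name index length hpre
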